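-- pv_equiv track=rewrite | github.com/balinwarren/adventofcode | day 4/scratchcards.py | count_new_scratchers
-- ===== SOURCE A (Python) =====
-- def count_new_scratchers(cards):
--     wins = []
--     instances = []
--
--     for card in cards:
--         win_num = 0
--
--         for num in card[1]:
--             if num.isdigit() and num in card[0]:
--                 win_num += 1
--
--         wins.append(win_num)
--         instances.append(1)
--
--     index = 0
--     for inst in instances:
--         for i in range(inst):
--             for j in range(1, wins[index] + 1):
--                 instances[index + j] += 1
--
--         index += 1
--
--     sum = 0
--     for inst in instances:
--         sum += inst
--
--     return sum
-- ===== SOURCE B (Python) =====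
-- def count_new_scratchers(cards):
--     # Same win-counting loop as the original, then a backward pass:
--     # totals[i] = copies won by one instance of card i including itself,
--     # pulled from already-computed downstream totals; answer = sum(totals).
--     wins = []
--     for card in cards:
--         win_num = 0
--         for num in card[1]:
--             if num.isdigit() and num in card[0]:
--                 win_num += 1
--         wins.append(win_num)
--
--     n = len(cards)
--     totals = [0] * n
--     for i in range(n - 1, -1, -1):
--         totals[i] = 1 + sum(totals[i + 1:i + 1 + wins[i]])
--     return sum(totals)
-- ===== Notes on version B (the rewrite author's own statement) =====
-- stated objective: alternative
-- what changed: Instead of pushing copy increments forward through a mutable instances array (re-scanning the win window once per accumulated instance), B computes each card's total subtree size in one backward pass, totals[i] = 1 + sum(totals[i+1:i+1+wins[i]]), and returns sum(totals).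
-- crash fix: On inputs where some card i has wins[i] > n-1-i, A raises IndexError (instances[index+j] past the end) while B returns the clamped-window total. — e.g. on count_new_scratchers([(["1"], ["1"])]): A raises IndexError, B returns 1
import Mathlib
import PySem

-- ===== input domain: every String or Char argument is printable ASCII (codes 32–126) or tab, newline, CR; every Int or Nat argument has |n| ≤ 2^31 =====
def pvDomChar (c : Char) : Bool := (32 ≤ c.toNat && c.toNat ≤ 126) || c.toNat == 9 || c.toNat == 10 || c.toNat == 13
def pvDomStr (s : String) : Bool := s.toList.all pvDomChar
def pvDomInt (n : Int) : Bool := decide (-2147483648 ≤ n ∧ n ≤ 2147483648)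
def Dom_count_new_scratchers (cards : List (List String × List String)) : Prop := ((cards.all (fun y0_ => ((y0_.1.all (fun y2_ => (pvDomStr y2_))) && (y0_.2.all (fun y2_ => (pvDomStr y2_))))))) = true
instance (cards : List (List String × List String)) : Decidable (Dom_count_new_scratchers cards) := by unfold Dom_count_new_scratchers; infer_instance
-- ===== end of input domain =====

-- B replaces A's forward push through a mutable instances array by a single backward
-- pass computing each card's total subtree size from downstream totals (same win loop).

-- ===== PORT A =====
-- shared helper, the win-counting inner loop (byte-identical in A and B):
-- win_num = 0; for num in card[1]: if num.isdigit() and num in card[0]: win_num += 1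
def pvWinCount (card : List String × List String) : Int :=
  card.2.foldl (fun acc num =>
    if PySem.Str.strIsdigit num && card.1.contains num then acc + 1 else acc) 0

-- 'for inst in instances' with a manual index, mutating instances: the Python list
-- iterator reads the CURRENT cell, so it is ported as an index loop reading
-- instances[index] at each step; instances[index+j] += 1 is a pySetD of pyGetD+1.
def count_new_scratchers (cards : List (List String × List String)) : Int :=
  let wins : List Int := cards.foldl (fun ws card => ws ++ [pvWinCount card]) []
  let instances : List Int := cards.foldl (fun ins _ => ins ++ [(1 : Int)]) []
  let instances := (List.range instances.length).foldl
    (fun ins (index : Nat) =>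
      (PySem.List.pyRange 0 (PySem.List.pyGetD ins (index : Int) 0) 1).foldl
        (fun ins2 _ =>
          (PySem.List.pyRange 1 (PySem.List.pyGetD wins (index : Int) 0 + 1) 1).foldl
            (fun ins3 j =>
              PySem.List.pySetD ins3 ((index : Int) + j)
                (PySem.List.pyGetD ins3 ((index : Int) + j) 0 + 1))
            ins2)
        ins)
    instances
  instances.foldl (fun s inst => s + inst) 0

-- ===== PORT B =====
-- B's backward loop 'for i in range(n-1,-1,-1): totals[i] = 1 + sum(totals[i+1:i+1+wins[i]])'
-- is ported as recursion on the list: each step computes totals[i] from the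
-- already-computed suffix (the slice clamps exactly like Python's).
def pvTotals : List (List String × List String) → List Int
  | [] => []
  | card :: rest =>
    let t := pvTotals rest
    (1 + (PySem.List.slice t (some 0) (some (pvWinCount card))).sum) :: t


def count_new_scratchers_alt (cards : List (List String × List String)) : Int :=
  (pvTotals cards).sum

-- ===== PRECONDITION & SPEC =====
-- Pre_ excludes exactly the inputs where A raises IndexError: some card's win count
-- reaches past the last card, so instances[index + j] is indexed out of range.
def Pre_count_new_scratchers (cards : List (List String × List String)) : Prop :=
  ∀ i < cards.length, (pvWinCount (cards.getD i ([], []))).toNat + i + 1 ≤ cards.length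
instance (cards : List (List String × List String)) : Decidable (Pre_count_new_scratchers cards) := by
  unfold Pre_count_new_scratchers; infer_instance

def pvWitness_count_new_scratchers : (List (List String × List String)) :=
  [(["1"], ["1"]), ([], [])]

-- On inputs where some card i wins more than the n-1-i cards below it, A raises
-- IndexError (instances[index+j] past the end) while B returns the total with the
-- win window clamped at the last card.
def Raises_count_new_scratchers (cards : List (List String × List String)) : Prop :=
  ∃ i < cards.length, cards.length < (pvWinCount (cards.getD i ([], []))).toNat + i + 1
instance (cards : List (List String × List String)) : Decidable (Raises_count_new_scratchers cards) := by
  unfold Raises_count_new_scratchers; infer_instance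

def pvRaiseWitness_count_new_scratchers : (List (List String × List String)) :=
  [(["1"], ["1"])]
def pvRaiseWitnessOut_count_new_scratchers : Int := 1

def Spec_count_new_scratchers (cards : List (List String × List String)) (out : Int) : Prop :=
  out = count_new_scratchers_alt cards
instance (cards : List (List String × List String)) (out : Int) : Decidable (Spec_count_new_scratchers cards out) := by
  unfold Spec_count_new_scratchers; infer_instance

-- ===== CLAIM (what is proved, stated in full; the proofs are below) =====
def Claim_equal_count_new_scratchers : Prop := ∀ (cards : List (List String × List String)), Dom_count_new_scratchers cards → Pre_count_new_scratchers cards → Spec_count_new_scratchers cards (count_new_scratchers cards)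

def Claim_raises_count_new_scratchers : Prop := (∀ (cards : List (List String × List String)), Dom_count_new_scratchers cards → Raises_count_new_scratchers cards → ¬ Pre_count_new_scratchers cards) ∧ (Dom_count_new_scratchers (pvRaiseWitness_count_new_scratchers) ∧ Raises_count_new_scratchers (pvRaiseWitness_count_new_scratchers) ∧ count_new_scratchers_alt (pvRaiseWitness_count_new_scratchers) = pvRaiseWitnessOut_count_new_scratchers)

-- ===== LEMMAS AND PROOFS =====
def pvStep (cards : List (List String × List String)) (ins : List Int) (index : Nat) : List Int :=
  (PySem.List.pyRange 0 (PySem.List.pyGetD ins (index : Int) 0) 1).foldl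
    (fun ins2 _ =>
      (PySem.List.pyRange 1 (PySem.List.pyGetD (cards.map pvWinCount) (index : Int) 0 + 1) 1).foldl
        (fun ins3 j =>
          PySem.List.pySetD ins3 ((index : Int) + j)
            (PySem.List.pyGetD ins3 ((index : Int) + j) 0 + 1))
        ins2)
    ins

def pvTf (cards : List (List String × List String)) (p : Nat) : Int :=
  (pvTotals cards).getD p 0

theorem pv_port_eq (cards : List (List String × List String)) :
    count_new_scratchers cards
      = ((List.range cards.length).foldl (pvStep cards)
          (cards.map (fun _ => (1:Int)))).foldl (fun s inst => s + inst) 0 := by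
  unfold count_new_scratchers pvStep
  simp only [PySem.List.foldl_append_singleton_eq_map, List.nil_append, List.length_map]


theorem pv_getD_set (xs : List Int) (n : Nat) (v : Int) (p : Nat) (d : Int) :
    (xs.set n v).getD p d = if p = n ∧ n < xs.length then v else xs.getD p d := by
  simp only [List.getD, List.getElem?_set]
  by_cases h1 : n = p
  · subst h1
    by_cases h2 : n < xs.length
    · simp [h2]
    · simp [h2]
  · simp [h1]
    intro h; exact absurd h.symm h1

theorem pv_jfold (k : Nat) : ∀ (m : Nat) (ins : List Int), k + m < ins.length →
    (((PySem.List.pyRange 1 ((m:Int)+1) 1).foldl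
        (fun s j => PySem.List.pySetD s ((k:Int)+j) (PySem.List.pyGetD s ((k:Int)+j) 0 + 1)) ins).length
      = ins.length) ∧
    ∀ p : Nat, ((PySem.List.pyRange 1 ((m:Int)+1) 1).foldl
        (fun s j => PySem.List.pySetD s ((k:Int)+j) (PySem.List.pyGetD s ((k:Int)+j) 0 + 1)) ins).getD p 0
      = ins.getD p 0 + if k+1 ≤ p ∧ p ≤ k+m then 1 else 0 := by
  intro m
  induction m with
  | zero =>
    intro ins h
    rw [show ((0:Nat):Int) + 1 = 1 by norm_num, PySem.List.pyRange_one_eq_nil le_rfl]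
    refine ⟨rfl, ?_⟩
    intro p
    have : ¬ (k+1 ≤ p ∧ p ≤ k+0) := by omega
    rw [if_neg this, List.foldl_nil, add_zero]
  | succ m ih =>
    intro ins h
    have hm : k + m < ins.length := by omega
    obtain ⟨ihlen, ihget⟩ := ih ins hm
    rw [show ((m+1:Nat):Int) + 1 = ((m:Int)+1) + 1 by push_cast; ring,
        PySem.List.pyRange_one_succ_right (by omega), List.foldl_append]
    simp only [List.foldl_cons, List.foldl_nil]
    rw [show (k:Int) + ((m:Int)+1) = ((k+m+1 : Nat) : Int) by push_cast; ring]
    simp only [PySem.List.pySetD_natCast, PySem.List.pyGetD_natCast]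
    refine ⟨by rw [List.length_set, ihlen], ?_⟩
    intro p
    rw [pv_getD_set, ihlen]
    by_cases hp : p = k + m + 1
    · subst hp
      rw [if_pos ⟨rfl, by omega⟩, ihget]
      split_ifs <;> omega
    · rw [if_neg (fun hh => hp hh.1), ihget]
      split_ifs <;> omega

theorem pv_ifold (k m : Nat) : ∀ (a : Nat) (ins : List Int), k + m < ins.length →
    (((PySem.List.pyRange 0 (a:Int) 1).foldl
        (fun s _ => (PySem.List.pyRange 1 ((m:Int)+1) 1).foldl
          (fun s2 j => PySem.List.pySetD s2 ((k:Int)+j) (PySem.List.pyGetD s2 ((k:Int)+j) 0 + 1)) s) ins).length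
      = ins.length) ∧
    ∀ p : Nat, ((PySem.List.pyRange 0 (a:Int) 1).foldl
        (fun s _ => (PySem.List.pyRange 1 ((m:Int)+1) 1).foldl
          (fun s2 j => PySem.List.pySetD s2 ((k:Int)+j) (PySem.List.pyGetD s2 ((k:Int)+j) 0 + 1)) s) ins).getD p 0
      = ins.getD p 0 + if k+1 ≤ p ∧ p ≤ k+m then (a:Int) else 0 := by
  intro a
  induction a with
  | zero =>
    intro ins h
    rw [show ((0:Nat):Int) = 0 by norm_num, PySem.List.pyRange_one_eq_nil le_rfl]
    refine ⟨rfl, ?_⟩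
    intro p
    split_ifs <;> simp
  | succ a ih =>
    intro ins h
    obtain ⟨ihlen, ihget⟩ := ih ins h
    rw [show ((a+1:Nat):Int) = (a:Int) + 1 by push_cast; ring,
        PySem.List.pyRange_one_succ_right (show (0:Int) ≤ (a:Int) from by exact_mod_cast Nat.zero_le a), List.foldl_append]
    simp only [List.foldl_cons, List.foldl_nil]
    have hlen' : k + m < (((PySem.List.pyRange 0 (a:Int) 1).foldl
        (fun s _ => (PySem.List.pyRange 1 ((m:Int)+1) 1).foldl
          (fun s2 j => PySem.List.pySetD s2 ((k:Int)+j) (PySem.List.pyGetD s2 ((k:Int)+j) 0 + 1)) s) ins)).length := by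
      rw [ihlen]; exact h
    obtain ⟨jlen, jget⟩ := pv_jfold k m _ hlen'
    refine ⟨by rw [jlen, ihlen], ?_⟩
    intro p
    rw [jget, ihget]
    split_ifs <;> ring

theorem pvWinCount_nonneg (card : List String × List String) : 0 ≤ pvWinCount card := by
  unfold pvWinCount
  suffices h : ∀ (l : List String) (acc : Int), acc ≤ l.foldl (fun acc num =>
      if PySem.Str.strIsdigit num && card.1.contains num then acc + 1 else acc) acc by
    simpa using h card.2 0
  intro l
  induction l with
  | nil => intro acc; simp
  | cons x xs ih =>
    intro acc
    simp only [List.foldl_cons]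
    refine le_trans ?_ (ih _)
    split_ifs <;> omega

theorem pvTotals_length (cards : List (List String × List String)) :
    (pvTotals cards).length = cards.length := by
  induction cards with
  | nil => rfl
  | cons c rest ih => simp [pvTotals, ih]

theorem pv_sum_take (t : List Int) : ∀ m, m ≤ t.length →
    (t.take m).sum = ∑ j ∈ Finset.range m, t.getD j 0 := by
  induction t with
  | nil => intro m hm; simp at hm; simp [hm]
  | cons x xs ih =>
    intro m hm
    cases m with
    | zero => simp
    | succ m =>
      simp only [List.take_succ_cons, List.sum_cons, Finset.sum_range_succ']
      rw [ih m (by simpa using hm)]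
      simp
      ring

-- characterization of totals under the no-clamp bound
theorem pvTotals_getD (cards : List (List String × List String)) :
    ∀ i, i < cards.length →
    i + 1 + (pvWinCount (cards.getD i ([], []))).toNat ≤ cards.length →
    (pvTotals cards).getD i 0
      = 1 + ∑ j ∈ Finset.Ico (i+1) (i+1+(pvWinCount (cards.getD i ([], []))).toNat),
          (pvTotals cards).getD j 0 := by
  induction cards with
  | nil => intro i hi; simp at hi
  | cons c rest ih =>
    intro i hi hw
    cases i with
    | zero =>
      simp only [List.getD_cons_zero] at hw ⊢
      have h0 : (pvTotals (c :: rest)).getD 0 0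
          = 1 + (PySem.List.slice (pvTotals rest) (some 0) (some (pvWinCount c))).sum := by
        simp [pvTotals]
      rw [h0]
      have hnn := pvWinCount_nonneg c
      rw [PySem.List.slice_zero_start, PySem.List.slice_to _ hnn]
      rw [pv_sum_take _ _ (by rw [pvTotals_length]; simp at hw hi ⊢; omega)]
      congr 1
      rw [Finset.sum_Ico_eq_sum_range]
      simp only [Nat.add_sub_cancel_left]
      apply Finset.sum_congr rfl
      intro j hj
      simp only [Finset.mem_range] at hj
      have : (pvTotals (c :: rest)).getD (1 + j) 0 = (pvTotals rest).getD j 0 := by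
        simp [pvTotals, Nat.add_comm 1 j]
      rw [this]
    | succ i =>
      simp only [List.getD_cons_succ] at hw ⊢
      have hstep : ∀ q, (pvTotals (c :: rest)).getD (q+1) 0 = (pvTotals rest).getD q 0 := by
        intro q; simp [pvTotals]
      rw [hstep]
      rw [ih i (by simpa using hi) (by simp at hw ⊢; omega)]
      congr 1
      rw [show i+1+1+(pvWinCount (rest.getD i ([], []))).toNat
            = (i+1+(pvWinCount (rest.getD i ([], []))).toNat)+1 by ring]
      rw [Finset.sum_Ico_eq_sum_range, Finset.sum_Ico_eq_sum_range]
      simp only [show ∀ w:Nat, i+1+w+1 - (i+1+1) = i+1+w - (i+1) from by intro w; omega]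
      apply Finset.sum_congr rfl
      intro j hj
      rw [show i+1+1+j = (i+1+j)+1 by ring, hstep]

theorem pv_sum_eq_range (t : List Int) : t.sum = ∑ j ∈ Finset.range t.length, t.getD j 0 := by
  simpa using pv_sum_take t t.length le_rfl

theorem pv_map_const_getD (cards : List (List String × List String)) (p : Nat)
    (h : p < cards.length) : (cards.map (fun _ => (1:Int))).getD p 0 = 1 := by
  simp [List.getD, h]

theorem pv_map_win_getD (cards : List (List String × List String)) (k : Nat)
    (h : k < cards.length) :
    (cards.map pvWinCount).getD k 0 = pvWinCount (cards.getD k ([], [])) := by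
  simp [List.getD, List.getElem?_map, List.getElem?_eq_getElem h]

theorem pv_invariant (cards : List (List String × List String))
    (hpre : ∀ i < cards.length, (pvWinCount (cards.getD i ([], []))).toNat + i + 1 ≤ cards.length) :
    ∀ k, k ≤ cards.length →
    ((List.range k).foldl (pvStep cards) (cards.map (fun _ => (1:Int)))).length = cards.length ∧
    (∀ p, p < cards.length →
      1 ≤ ((List.range k).foldl (pvStep cards) (cards.map (fun _ => (1:Int)))).getD p 0) ∧
    (∑ p ∈ Finset.range cards.length,
        ((List.range k).foldl (pvStep cards) (cards.map (fun _ => (1:Int)))).getD p 0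
          * (if p < k then 1 else pvTf cards p))
      = ∑ p ∈ Finset.range cards.length, pvTf cards p := by
  intro k
  induction k with
  | zero =>
    intro _
    refine ⟨by simp, ?_, ?_⟩
    · intro p hp
      simp only [List.range_zero, List.foldl_nil]
      rw [pv_map_const_getD cards p hp]
    · apply Finset.sum_congr rfl
      intro p hp
      simp only [List.range_zero, List.foldl_nil, Nat.not_lt_zero, if_false]
      rw [pv_map_const_getD cards p (Finset.mem_range.1 hp)]
      ring
  | succ k ih =>
    intro hk1
    have hk : k < cards.length := hk1
    obtain ⟨hPlen, hPpos, hPsum⟩ := ih (by omega)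
    set P : List Int := (List.range k).foldl (pvStep cards) (cards.map (fun _ => (1:Int))) with hP
    have hrange : List.range (k+1) = List.range k ++ [k] := List.range_succ
    rw [hrange, List.foldl_append, List.foldl_cons, List.foldl_nil, ← hP]
    -- rewrite the step at index k via ifold
    obtain ⟨m, hmc⟩ : ∃ mm : Nat, ((mm:Int)) = pvWinCount (cards.getD k ([], [])) :=
      ⟨_, Int.toNat_of_nonneg (pvWinCount_nonneg _)⟩
    have hmnat : (pvWinCount (cards.getD k ([], []))).toNat = m := by omega
    have hmle : k + m < cards.length := by have := hpre k hk; omega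
    obtain ⟨a, hac⟩ : ∃ aa : Nat, ((aa:Int)) = P.getD k 0 :=
      ⟨_, Int.toNat_of_nonneg (le_trans (by norm_num) (hPpos k hk))⟩
    have hstep : pvStep cards P k
        = (PySem.List.pyRange 0 (a:Int) 1).foldl
            (fun s _ => (PySem.List.pyRange 1 ((m:Int)+1) 1).foldl
              (fun s2 j => PySem.List.pySetD s2 ((k:Int)+j) (PySem.List.pyGetD s2 ((k:Int)+j) 0 + 1)) s) P := by
      unfold pvStep
      simp only [PySem.List.pyGetD_natCast]
      rw [pv_map_win_getD cards k hk, ← hmc, ← hac]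
    rw [hstep]
    have hlb : k + m < P.length := by rw [hPlen]; exact hmle
    obtain ⟨flen, fget⟩ := pv_ifold k m a P hlb
    refine ⟨by rw [flen, hPlen], ?_, ?_⟩
    · intro p hp
      rw [fget p]
      have := hPpos p hp
      split_ifs <;> omega
    · have hTfk : pvTf cards k = 1 + ∑ j ∈ Finset.Ico (k+1) (k+1+m), pvTf cards j := by
        have hch := pvTotals_getD cards k hk (by omega)
        rw [hmnat] at hch
        exact hch
      have h1 : ∑ p ∈ Finset.range cards.length,
            ((PySem.List.pyRange 0 (a:Int) 1).foldl
              (fun s _ => (PySem.List.pyRange 1 ((m:Int)+1) 1).foldl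
                (fun s2 j => PySem.List.pySetD s2 ((k:Int)+j) (PySem.List.pyGetD s2 ((k:Int)+j) 0 + 1)) s) P).getD p 0
              * (if p < k+1 then 1 else pvTf cards p)
          = ∑ p ∈ Finset.range cards.length,
              (P.getD p 0 * (if p < k+1 then 1 else pvTf cards p)
               + (if k+1 ≤ p ∧ p ≤ k+m then (a:Int) else 0) * (if p < k+1 then 1 else pvTf cards p)) := by
        apply Finset.sum_congr rfl
        intro p _
        rw [fget p]
        ring
      rw [h1, Finset.sum_add_distrib]
      have h2 : ∑ p ∈ Finset.range cards.length,
            P.getD p 0 * (if p < k+1 then 1 else pvTf cards p)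
          = (∑ p ∈ Finset.range cards.length, P.getD p 0 * (if p < k then 1 else pvTf cards p))
            + P.getD k 0 * (1 - pvTf cards k) := by
        have hsub : ∀ p ∈ Finset.range cards.length,
            P.getD p 0 * (if p < k+1 then 1 else pvTf cards p)
              = P.getD p 0 * (if p < k then 1 else pvTf cards p)
                + (if p = k then P.getD k 0 * (1 - pvTf cards k) else 0) := by
          intro p _
          by_cases hpk : p = k
          · subst hpk
            rw [if_pos rfl, if_pos (by omega), if_neg (by omega)]
            ring
          · rw [if_neg hpk, add_zero]
            congr 1
            split_ifs <;> first | rfl | (exfalso; omega)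
        rw [Finset.sum_congr rfl hsub, Finset.sum_add_distrib, Finset.sum_ite_eq' (Finset.range cards.length)]
        rw [if_pos (Finset.mem_range.2 hk)]
      have h3 : ∑ p ∈ Finset.range cards.length,
            (if k+1 ≤ p ∧ p ≤ k+m then (a:Int) else 0) * (if p < k+1 then 1 else pvTf cards p)
          = (a:Int) * ∑ j ∈ Finset.Ico (k+1) (k+1+m), pvTf cards j := by
        have hterm : ∀ p ∈ Finset.range cards.length,
            (if k+1 ≤ p ∧ p ≤ k+m then (a:Int) else 0) * (if p < k+1 then 1 else pvTf cards p)
              = if p ∈ Finset.Ico (k+1) (k+1+m) then (a:Int) * pvTf cards p else 0 := by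
          intro p _
          simp only [Finset.mem_Ico]
          by_cases hw : k+1 ≤ p ∧ p ≤ k+m
          · have hc1 : k+1 ≤ p ∧ p < k+1+m := by omega
            have hc2 : ¬ (p < k+1) := by omega
            rw [if_pos hw, if_pos hc1, if_neg hc2]
          · have hc1 : ¬ (k+1 ≤ p ∧ p < k+1+m) := by omega
            rw [if_neg hw, if_neg hc1, zero_mul]
        rw [Finset.sum_congr rfl hterm, Finset.sum_ite_mem]
        rw [Finset.inter_eq_right.mpr
              (by intro x hx; rw [Finset.mem_Ico] at hx; exact Finset.mem_range.2 (by omega))]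
        rw [← Finset.mul_sum]
      rw [h2, h3, hPsum, hac]
      linear_combination (-(P.getD k 0)) * hTfk

theorem pv_main (cards : List (List String × List String))
    (hpre : ∀ i < cards.length, (pvWinCount (cards.getD i ([], []))).toNat + i + 1 ≤ cards.length) :
    count_new_scratchers cards = (pvTotals cards).sum := by
  rw [pv_port_eq]
  obtain ⟨hlen, -, hsum⟩ := pv_invariant cards hpre cards.length le_rfl
  rw [← List.sum_eq_foldl]
  rw [pv_sum_eq_range, hlen]
  have h2 : ∑ p ∈ Finset.range cards.length,
        ((List.range cards.length).foldl (pvStep cards) (cards.map (fun _ => (1:Int)))).getD p 0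
      = ∑ p ∈ Finset.range cards.length,
          ((List.range cards.length).foldl (pvStep cards) (cards.map (fun _ => (1:Int)))).getD p 0
            * (if p < cards.length then 1 else pvTf cards p) := by
    apply Finset.sum_congr rfl
    intro p hp
    rw [if_pos (Finset.mem_range.1 hp), mul_one]
  rw [h2, hsum, pv_sum_eq_range (pvTotals cards), pvTotals_length]
  rfl

-- ===== VERDICT (by name: the statement is the Claim_ definition above) =====
theorem count_new_scratchers_spec : Claim_equal_count_new_scratchers := by
  intro cards _ hpre
  unfold Spec_count_new_scratchers count_new_scratchers_alt
  exact pv_main cards hpre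

@[simp] theorem count_new_scratchers_raises : Claim_raises_count_new_scratchers := by
  unfold Claim_raises_count_new_scratchers
  refine ⟨?_, by decide⟩
  intro cards _ hr hpre
  obtain ⟨i, hi, hlt⟩ := hr
  exact absurd (hpre i hi) (by omega)
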